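-- pv_equiv track=rewrite | github.com/geekshant/ACC45DAYSOFCODE-2024 | DAY43-Decode_the_Message.py | generate_substitution_table
-- ===== SOURCE A (Python) =====
-- def generate_substitution_table(key):
--     # Create an empty dictionary for the substitution table
--     substitution_table = {}
--     # Initialize a set to keep track of seen characters
--     seen = set()
--     # Initialize the current alphabet letter
--     current_letter = 'a'
--
--     # Iterate through each character in the key
--     for char in key:
--         if char.isalpha() and char not in seen:
--             # Add the character to the substitution table
--             substitution_table[char] = current_letter
--             # Add the character to the seen set
--             seen.add(char)
--             # Move to the next alphabet letter
--             current_letter = chr(ord(current_letter) + 1)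
--             if current_letter > 'z':
--                 break
--
--     return substitution_table
-- ===== SOURCE B (Python) =====
-- def generate_substitution_table(key):
--     # Selection-style recursion: take the head of the remaining alphabetic
--     # characters as the next table entry, remove all its duplicates from the
--     # tail, and recurse with the next letter; no seen-set is maintained.
--     def go(chars, code):
--         if not chars or code > ord('z'):
--             return {}
--         c = chars[0]
--         table = {c: chr(code)}
--         table.update(go([x for x in chars[1:] if x != c], code + 1))
--         return table
--     return go([c for c in key if c.isalpha()], ord('a'))
-- ===== Notes on version B (the rewrite author's own statement) =====
-- stated objective: alternative
-- what changed: Replaces A's single pass with a seen-set and incremental current_letter arithmetic by a selection-style recursion: filter the alphabetic characters once, then repeatedly take the head as the next entry, filter its duplicates out of the tail, and recurse with the next letter (no seen-set, dedup by filtering).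
import Mathlib
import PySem

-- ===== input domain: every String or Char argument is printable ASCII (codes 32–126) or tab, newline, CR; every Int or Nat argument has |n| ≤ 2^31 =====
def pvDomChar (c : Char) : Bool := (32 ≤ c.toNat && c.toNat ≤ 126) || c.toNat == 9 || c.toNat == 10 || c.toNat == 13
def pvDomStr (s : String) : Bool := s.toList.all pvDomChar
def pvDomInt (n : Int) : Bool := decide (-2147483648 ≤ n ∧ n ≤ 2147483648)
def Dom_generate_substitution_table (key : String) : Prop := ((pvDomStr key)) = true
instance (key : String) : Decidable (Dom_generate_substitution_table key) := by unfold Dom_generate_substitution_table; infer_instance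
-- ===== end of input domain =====

-- B replaces A's seen-set/current_letter single pass by a selection-style recursion: take the
-- head of the remaining alphabetic characters, filter its duplicates out of the tail, recurse
-- with the next letter (alternative decomposition, no seen-set).

-- ===== PORT A =====
-- A's loop: substitution_table / seen / current_letter are the fold state; current_letter is
-- carried as its code (ord): 'a' = 97, chr(ord(..)+1) = +1, "> 'z'" = > 122.  The break is the
-- early return in the cur+1 > 122 branch.
def pvGoA : List Char → PySem.Dict String String → PySem.Set Char → Nat → PySem.Dict String String
  | [], tbl, _, _ => tbl
  | c :: rest, tbl, seen, cur =>
    if PySem.Chars.isalpha c && !(PySem.Set.contains seen c) then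
      let tbl' := PySem.Dict.insert tbl (String.ofList [c]) (String.ofList [Char.ofNat cur])
      let seen' := PySem.Set.add seen c
      if cur + 1 > 122 then tbl' else pvGoA rest tbl' seen' (cur + 1)
    else pvGoA rest tbl seen cur

def generate_substitution_table (key : String) : List (String × String) :=
  (pvGoA key.toList PySem.Dict.empty PySem.Set.empty 97).items

-- ===== PORT B =====
-- Source B's go(chars, code): empty or code > ord('z') → {}; otherwise head c gets chr(code),
-- duplicates of c are filtered out of the tail, recurse with code+1 (dict update appends).
def pvGoB (code : Nat) : List Char → List (String × String)
  | [] => []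
  | c :: rest =>
    if code > 122 then []
    else
      (String.ofList [c], String.ofList [Char.ofNat code]) ::
        pvGoB (code + 1) (rest.filter (fun x => !(x == c)))
termination_by l => l.length
decreasing_by
  simp only [List.length_unattach]
  exact Nat.lt_succ_of_le (le_trans (List.length_filter_le _ _) (Nat.le_of_eq List.length_attach))

def generate_substitution_table_alt (key : String) : List (String × String) :=
  pvGoB 97 (key.toList.filter (fun c => PySem.Chars.isalpha c))

-- ===== PRECONDITION & SPEC =====
def Spec_generate_substitution_table (key : String) (out : List (String × String)) : Prop := out = generate_substitution_table_alt key
instance (key : String) (out : List (String × String)) : Decidable (Spec_generate_substitution_table key out) := by unfold Spec_generate_substitution_table; infer_instance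

-- ===== CLAIM (what is proved, stated in full; the proofs are below) =====
def Claim_equal_generate_substitution_table : Prop := ∀ (key : String), Dom_generate_substitution_table key → Spec_generate_substitution_table key (generate_substitution_table key)

-- ===== LEMMAS AND PROOFS =====

-- The table A builds, as a pure list: letter codes assigned from `cur`, stopping after 122 ('z').
def pvAssign : Nat → List (Char) → List (String × String)
  | _, [] => []
  | cur, c :: rest =>
      (String.ofList [c], String.ofList [Char.ofNat cur]) ::
        (if cur + 1 > 122 then [] else pvAssign (cur + 1) rest)

theorem pv_ofList_filter {α : Type} [BEq α] [LawfulBEq α] (p : α → Bool) (l : List α) :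
    PySem.Set.ofList (l.filter p) = (PySem.Set.ofList l).filter p := by
  induction l with
  | nil => simp [PySem.Set.ofList_nil]
  | cons c l ih =>
    by_cases hp : p c = true
    · rw [List.filter_cons_of_pos hp, PySem.Set.ofList_cons, PySem.Set.ofList_cons,
        List.filter_cons_of_pos hp]
      simp only [PySem.Set.discard, ih, List.filter_filter]
      exact congrArg₂ _ rfl (List.filter_congr (fun a _ => Bool.and_comm _ _))
    · have hp' : p c = false := by simpa using hp
      rw [List.filter_cons_of_neg (by simp [hp']), PySem.Set.ofList_cons,
        List.filter_cons_of_neg (by simp [hp']), ih]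
      simp only [PySem.Set.discard, List.filter_filter]
      refine (List.filter_congr (fun a _ => ?_)).symm
      by_cases hac : a = c
      · subst hac; simp [hp']
      · simp [hac]

theorem pv_dedup_cons {α : Type} [BEq α] [LawfulBEq α] (c : α) (l : List α) :
    PySem.List.dedup (c :: l) = c :: PySem.List.dedup (l.filter (fun y => !(y == c))) := by
  rw [PySem.List.dedup_eq_ofList, PySem.List.dedup_eq_ofList, PySem.Set.ofList_cons,
    pv_ofList_filter]
  rfl

theorem pv_mk_singleton_inj {c c' : Char} (h : String.ofList [c] = String.ofList [c']) : c = c' := by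
  have := congrArg String.toList h
  simp only [String.toList_ofList] at this
  exact List.singleton_injective this

-- Main invariant for A's loop.
theorem pv_goA_items (cs : List Char) :
    ∀ (tbl : PySem.Dict String String) (seen : PySem.Set Char) (cur : Nat),
      cur ≤ 122 →
      (∀ c : Char, PySem.Set.contains seen c = false →
        PySem.Dict.contains tbl (String.ofList [c]) = false) →
      (pvGoA cs tbl seen cur).items
        = tbl.items ++ pvAssign cur (PySem.List.dedup
            (cs.filter (fun c => PySem.Chars.isalpha c && !(PySem.Set.contains seen c)))) := by
  induction cs with
  | nil =>
    intro tbl seen cur _ _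
    simp [pvGoA, PySem.List.dedup_eq_ofList, PySem.Set.ofList_nil, pvAssign]
  | cons c rest ih =>
    intro tbl seen cur hcur hinv
    by_cases hp : (PySem.Chars.isalpha c && !(PySem.Set.contains seen c)) = true
    · have hseen : PySem.Set.contains seen c = false := by
        rcases Bool.and_eq_true_iff.mp hp with ⟨_, h2⟩
        simpa using h2
      have htbl : PySem.Dict.contains tbl (String.ofList [c]) = false := hinv c hseen
      have hitems :
          (PySem.Dict.insert tbl (String.ofList [c]) (String.ofList [Char.ofNat cur])).items
            = tbl.items ++ [(String.ofList [c], String.ofList [Char.ofNat cur])] :=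
        PySem.Dict.items_insert_of_not_contains tbl _ htbl
      have hfilter :
          (c :: rest).filter (fun x => PySem.Chars.isalpha x && !(PySem.Set.contains seen x))
            = c :: rest.filter (fun x => PySem.Chars.isalpha x && !(PySem.Set.contains seen x)) :=
        List.filter_cons_of_pos hp
      have hmem : c ∉ seen := by simpa using hseen
      have hadd : PySem.Set.add seen c = seen ++ [c] := by
        simp [PySem.Set.add, PySem.Set.contains, hmem]
      have hpredadd :
          rest.filter (fun x => PySem.Chars.isalpha x && !(PySem.Set.contains (PySem.Set.add seen c) x))
            = (rest.filter (fun x => PySem.Chars.isalpha x && !(PySem.Set.contains seen x))).filter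
                (fun y => !(y == c)) := by
        rw [List.filter_filter]
        refine List.filter_congr (fun a _ => ?_)
        rw [hadd]
        simp only [PySem.Set.contains, List.contains_append]
        by_cases hac : a = c
        · subst hac; simp
        · simp only [List.contains_cons, List.contains_nil]
          cases PySem.Chars.isalpha a <;> cases hsa : List.contains seen a <;>
            simp [hsa]
      rw [hfilter, pv_dedup_cons, ← hpredadd]
      by_cases hbreak : cur + 1 > 122
      · have : cur = 122 := by omega
        subst this
        simp only [pvGoA, hp, if_true]
        rw [if_pos (by omega : 122 + 1 > 122), hitems]
        simp [pvAssign]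
      · have hb : ¬ (cur + 1 > 122) := hbreak
        simp only [pvGoA, hp, if_true, if_neg hb]
        rw [ih _ _ (cur + 1) (by omega) ?hinv']
        · rw [hitems, pvAssign, if_neg hb, List.append_assoc]
          rfl
        case hinv' =>
          intro c' hc'
          rw [PySem.Dict.contains_insert]
          have h1 : PySem.Set.contains seen c' = false := by
            rw [hadd] at hc'
            simp only [PySem.Set.contains, List.contains_append] at hc'
            exact (Bool.or_eq_false_iff.mp hc').1
          have h2 : c' ≠ c := by
            intro h; subst h
            rw [hadd] at hc'
            simp [PySem.Set.contains] at hc'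
          have h3 : (String.ofList [c'] == String.ofList [c]) = false := by
            simp only [beq_eq_false_iff_ne, ne_eq]
            intro h; exact h2 (pv_mk_singleton_inj h)
          rw [h3, hinv c' h1]
          rfl
    · have hp' : (PySem.Chars.isalpha c && !(PySem.Set.contains seen c)) = false := by
        simpa using hp
      simp only [pvGoA, hp', Bool.false_eq_true, if_false]
      rw [ih _ _ _ hcur hinv, List.filter_cons_of_neg (by simp only [hp', Bool.false_eq_true, not_false_eq_true])]

-- B's selection recursion past 'z' yields nothing.
theorem pv_goB_stop (code : Nat) (h : code > 122) : ∀ l : List Char, pvGoB code l = [] := by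
  intro l
  cases l with
  | nil => simp [pvGoB]
  | cons c rest => rw [pvGoB, if_pos h]

-- B's selection recursion equals pvAssign ∘ dedup.
theorem pv_goB_eq_assign (n : Nat) :
    ∀ (l : List Char), l.length ≤ n → ∀ (code : Nat), code ≤ 122 →
      pvGoB code l = pvAssign code (PySem.List.dedup l) := by
  induction n with
  | zero =>
    intro l hl code _
    have : l = [] := List.eq_nil_of_length_eq_zero (Nat.le_zero.mp hl)
    subst this
    simp [pvGoB, pvAssign, PySem.List.dedup_eq_ofList, PySem.Set.ofList_nil]
  | succ n ih =>
    intro l hl code hcode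
    cases l with
    | nil => simp [pvGoB, pvAssign, PySem.List.dedup_eq_ofList, PySem.Set.ofList_nil]
    | cons c rest =>
      rw [pv_dedup_cons, pvGoB, if_neg (by omega), pvAssign]
      by_cases hbreak : code + 1 > 122
      · rw [if_pos hbreak, pv_goB_stop _ hbreak]
      · rw [if_neg hbreak,
          ih _ (le_trans (List.length_filter_le _ _) (Nat.le_of_succ_le_succ hl)) _ (by omega)]

-- ===== VERDICT (by name: the statement is the Claim_ definition above) =====
theorem generate_substitution_table_spec : Claim_equal_generate_substitution_table := by
  unfold Claim_equal_generate_substitution_table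
  intro key _
  unfold Spec_generate_substitution_table generate_substitution_table generate_substitution_table_alt
  rw [pv_goA_items key.toList PySem.Dict.empty PySem.Set.empty 97 (by omega)
    (fun c _ => PySem.Dict.contains_empty _)]
  have hf : key.toList.filter (fun c => PySem.Chars.isalpha c && !(PySem.Set.contains PySem.Set.empty c))
      = key.toList.filter (fun c => PySem.Chars.isalpha c) := by
    refine List.filter_congr (fun a _ => ?_)
    simp [PySem.Set.contains, PySem.Set.empty]
  rw [hf, pv_goB_eq_assign (key.toList.filter (fun c => PySem.Chars.isalpha c)).length _ le_rfl 97 (by omega)]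
  rfl
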